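-- pv_equiv track=rewrite | github.com/UlrichSchlueter/connections | prepFriends.py | buildBuckets
-- ===== SOURCE A (Python) =====
-- def buildBuckets(chars):
--     buckets = list()
--     buckets.append([])
--     buckets.append([])
--     buckets.append([])
--     used = [0, 0, 0]
--
--     for k in chars:
--         minUsed = 0
--         for i in range(1, 3):
--             if used[minUsed] > used[i]:
--                 minUsed = i
--         buckets[minUsed].append(k)
--         v = chars[k]
--         used[minUsed] += v
--     return buckets
-- ===== SOURCE B (Python) =====
-- def _push(queue, item):
--     # insert item into the lexicographically sorted queue, after equal items
--     i = 0
--     while i < len(queue) and queue[i] <= item: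
--         i += 1
--     queue.insert(i, item)
--
--
-- def buildBuckets(chars):
--     buckets = [[], [], []]
--     # priority queue of (load, bucket_index), kept sorted; ties pop the lowest index
--     queue = [(0, 0), (0, 1), (0, 2)]
--     for k, v in chars.items():
--         load, idx = queue.pop(0)
--         buckets[idx].append(k)
--         _push(queue, (load + v, idx))
--     return buckets
-- ===== Notes on version B (the rewrite author's own statement) =====
-- stated objective: alternative
-- what changed: Replaces A's per-key linear argmin scan over the used[] load array by a priority queue of (load, bucket_index) pairs kept lexicographically sorted: pop the head for the least-loaded bucket (ties to the lowest index) and re-insert it with its new load.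
import Mathlib
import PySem

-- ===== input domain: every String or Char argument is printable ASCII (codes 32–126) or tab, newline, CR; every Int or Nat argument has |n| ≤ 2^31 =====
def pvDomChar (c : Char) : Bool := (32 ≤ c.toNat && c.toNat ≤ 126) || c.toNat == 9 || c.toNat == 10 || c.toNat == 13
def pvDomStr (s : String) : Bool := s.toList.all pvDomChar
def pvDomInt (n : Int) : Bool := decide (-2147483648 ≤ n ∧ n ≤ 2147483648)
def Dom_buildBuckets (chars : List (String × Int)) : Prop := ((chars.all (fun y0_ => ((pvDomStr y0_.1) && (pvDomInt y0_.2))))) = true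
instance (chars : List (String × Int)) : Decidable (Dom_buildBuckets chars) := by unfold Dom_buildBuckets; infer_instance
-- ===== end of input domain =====

-- B replaces A's per-key argmin scan over the used[] array by a sorted priority queue of
-- (load, bucket_index) pairs (alternative data structure, same cost for 3 buckets).

-- ===== PORT A =====
-- 'for k in chars' iterates the dict's keys; 'chars[k]' is the first-match lookup
-- (exact on Pre_: keys are unique, so the key is always present and .getD 0 never fires).
def buildBuckets (chars : List (String × Int)) : List (List String) :=
  ((chars.map Prod.fst).foldl
    (fun (st : List (List String) × List Int) k =>
      let minUsed : Int := (PySem.List.pyRange 1 3 1).foldl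
        (fun m i => if PySem.List.pyGetD st.2 m 0 > PySem.List.pyGetD st.2 i 0 then i else m) 0
      let v : Int := (List.lookup k chars).getD 0
      -- minUsed ∈ {0,1,2}, so .toNat is exact
      (st.1.modify minUsed.toNat (· ++ [k]), st.2.modify minUsed.toNat (· + v)))
    ([[], [], []], [0, 0, 0])).1

-- ===== PORT B =====
-- _push: insert into the lexicographically sorted queue, after equal items
def pqPush : List (Int × Int) → (Int × Int) → List (Int × Int)
  | [], p => [p]
  | q :: rest, p =>
    if q.1 < p.1 ∨ (q.1 = p.1 ∧ q.2 ≤ p.2) then q :: pqPush rest p else p :: q :: rest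

-- 'for k, v in chars.items()' iterates the pairs; queue.pop(0) is the match on the head
-- (the queue always holds 3 items, so the [] branch is unreachable).
def buildBuckets_alt (chars : List (String × Int)) : List (List String) :=
  (chars.foldl
    (fun (st : List (List String) × List (Int × Int)) kv =>
      match st.2 with
      | [] => st
      | (load, idx) :: rest =>
        (st.1.modify idx.toNat (· ++ [kv.1]), pqPush rest (load + kv.2, idx)))
    ([[], [], []], [(0, 0), (0, 1), (0, 2)])).1

-- ===== PRECONDITION & SPEC =====
-- Pre_ excludes association lists with duplicate keys: the parameter is a Python dict, which
-- cannot hold duplicates, and on such lists the dict's collapse of entries is unrepresentable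
-- by a first-match association-list port.
def Pre_buildBuckets (chars : List (String × Int)) : Prop := (chars.map Prod.fst).Nodup
instance (chars : List (String × Int)) : Decidable (Pre_buildBuckets chars) := by
  unfold Pre_buildBuckets; infer_instance

def pvWitness_buildBuckets : (List (String × Int)) := [("a", 3), ("b", 1), ("c", 2), ("d", 1)]

def Spec_buildBuckets (chars : List (String × Int)) (out : List (List String)) : Prop := out = buildBuckets_alt chars
instance (chars : List (String × Int)) (out : List (List String)) : Decidable (Spec_buildBuckets chars out) := by unfold Spec_buildBuckets; infer_instance

-- ===== CLAIM (what is proved, stated in full; the proofs are below) =====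
def Claim_equal_buildBuckets : Prop := ∀ (chars : List (String × Int)), Dom_buildBuckets chars → Pre_buildBuckets chars → Spec_buildBuckets chars (buildBuckets chars)

-- ===== LEMMAS AND PROOFS =====

-- proof-side restatement of A's loop body, with the looked-up value supplied directly
def stepA (st : List (List String) × List Int) (kv : String × Int) :
    List (List String) × List Int :=
  let minUsed : Int := (PySem.List.pyRange 1 3 1).foldl
    (fun m i => if PySem.List.pyGetD st.2 m 0 > PySem.List.pyGetD st.2 i 0 then i else m) 0
  (st.1.modify minUsed.toNat (· ++ [kv.1]), st.2.modify minUsed.toNat (· + kv.2))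

-- proof-side restatement of B's loop body
def stepB (st : List (List String) × List (Int × Int)) (kv : String × Int) :
    List (List String) × List (Int × Int) :=
  match st.2 with
  | [] => st
  | (load, idx) :: rest =>
    (st.1.modify idx.toNat (· ++ [kv.1]), pqPush rest (load + kv.2, idx))

-- the sorted queue representing loads (a, b, c) of buckets 0, 1, 2
def qrep (a b c : Int) : List (Int × Int) := pqPush (pqPush [(a, 0)] (b, 1)) (c, 2)

lemma qrep_eval (a b c : Int) : qrep a b c =
    if a ≤ b then
      (if a ≤ c then
        (if b ≤ c then [(a, 0), (b, 1), (c, 2)] else [(a, 0), (c, 2), (b, 1)])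
       else [(c, 2), (a, 0), (b, 1)])
    else
      (if b ≤ c then
        (if a ≤ c then [(b, 1), (a, 0), (c, 2)] else [(b, 1), (c, 2), (a, 0)])
       else [(c, 2), (b, 1), (a, 0)]) := by
  simp only [qrep, pqPush]
  split_ifs <;> (try (simp only [pqPush]; split_ifs)) <;> first | rfl | omega

lemma lookup_eq_some_of_nodup (p : String × Int) :
    ∀ (chars : List (String × Int)), (chars.map Prod.fst).Nodup → p ∈ chars →
    List.lookup p.1 chars = some p.2 := by
  intro chars
  induction chars with
  | nil => intro _ hp; simp at hp
  | cons q rest ih =>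
    intro hnd hp
    simp only [List.map_cons, List.nodup_cons] at hnd
    rcases List.mem_cons.mp hp with hp | hp
    · subst hp; simp [List.lookup]
    · have hne : q.1 ≠ p.1 := by
        intro h; exact hnd.1 (h ▸ List.mem_map_of_mem hp)
      have hb : (p.1 == q.1) = false := by simpa using Ne.symm hne
      simp only [List.lookup, hb]
      exact ih hnd.2 hp

lemma foldA_keys (chars : List (String × Int)) :
    ∀ (l : List (String × Int)) (st : List (List String) × List Int),
    (∀ p ∈ l, List.lookup p.1 chars = some p.2) →
    ((l.map Prod.fst).foldl
      (fun (st : List (List String) × List Int) k =>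
        let minUsed : Int := (PySem.List.pyRange 1 3 1).foldl
          (fun m i => if PySem.List.pyGetD st.2 m 0 > PySem.List.pyGetD st.2 i 0 then i else m) 0
        let v : Int := (List.lookup k chars).getD 0
        (st.1.modify minUsed.toNat (· ++ [k]), st.2.modify minUsed.toNat (· + v))) st)
      = l.foldl stepA st := by
  intro l
  induction l with
  | nil => intro st h; rfl
  | cons p rest ih =>
    intro st h
    simp only [List.map_cons, List.foldl_cons]
    rw [h p (List.mem_cons_self), ih _ (fun q hq => h q (List.mem_cons_of_mem _ hq))]
    rfl

lemma stepA_eval (B0 : List (List String)) (a b c : Int) (k : String) (v : Int) :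
    stepA (B0, [a, b, c]) (k, v) =
      if a > b then
        (if b > c then (B0.modify 2 (· ++ [k]), [a, b, c + v])
         else (B0.modify 1 (· ++ [k]), [a, b + v, c]))
      else
        (if a > c then (B0.modify 2 (· ++ [k]), [a, b, c + v])
         else (B0.modify 0 (· ++ [k]), [a + v, b, c])) := by
  have h : PySem.List.pyRange 1 3 1 = [1, 2] := by decide
  simp only [stepA, h, List.foldl_cons, List.foldl_nil]
  simp only [PySem.List.pyGetD]
  norm_num
  split_ifs <;> simp_all [List.modify] <;> omega

lemma stepB_eval (B0 : List (List String)) (a b c : Int) (k : String) (v : Int) :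
    stepB (B0, qrep a b c) (k, v) =
      if a > b then
        (if b > c then (B0.modify 2 (· ++ [k]), qrep a b (c + v))
         else (B0.modify 1 (· ++ [k]), qrep a (b + v) c))
      else
        (if a > c then (B0.modify 2 (· ++ [k]), qrep a b (c + v))
         else (B0.modify 0 (· ++ [k]), qrep (a + v) b c)) := by
  simp only [qrep_eval]
  split_ifs <;> simp only [stepB, pqPush] <;>
    (try split_ifs) <;> (try (simp only [pqPush]; split_ifs)) <;> first | rfl | omega

lemma inv_fold (l : List (String × Int)) :
    ∀ (B0 : List (List String)) (a b c : Int),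
    (l.foldl stepB (B0, qrep a b c)).1 = (l.foldl stepA (B0, [a, b, c])).1 := by
  induction l with
  | nil => intro B0 a b c; rfl
  | cons kv rest ih =>
    intro B0 a b c
    obtain ⟨k, v⟩ := kv
    simp only [List.foldl_cons, stepA_eval, stepB_eval]
    split_ifs <;> apply ih

lemma altB_eq_fold (chars : List (String × Int)) :
    buildBuckets_alt chars =
      (chars.foldl stepB ([[], [], []], [(0, 0), (0, 1), (0, 2)])).1 := by
  unfold buildBuckets_alt
  congr 1

-- ===== VERDICT (by name: the statement is the Claim_ definition above) =====
theorem buildBuckets_spec : Claim_equal_buildBuckets := by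
  intro chars _hdom hpre
  unfold Spec_buildBuckets
  have hA : buildBuckets chars = (chars.foldl stepA ([[], [], []], [0, 0, 0])).1 :=
    congrArg Prod.fst
      (foldA_keys chars chars _ (fun p hp => lookup_eq_some_of_nodup p chars hpre hp))
  rw [hA, altB_eq_fold]
  have h : qrep 0 0 0 = [(0, 0), (0, 1), (0, 2)] := by decide
  rw [← h, inv_fold]
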